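-- pv_equiv track=rewrite | github.com/hypergraphman/AnnaEGE24 | task5/other/5.py | f
-- ===== SOURCE A (Python) =====
-- def f(n):
--     a = []
--     while n:
--         a.insert(0, n % 20)
--         n //= 20
--     r = 0
--     for d in a:
--         r *= 20
--         if d != 19:
--             d += 1
--         r += d
--     return r
-- ===== SOURCE B (Python) =====
-- def f(n):
--     r = 0
--     p = 1
--     while n:
--         d = n % 20
--         r += (d if d == 19 else d + 1) * p
--         p *= 20
--         n //= 20
--     return r
-- ===== Notes on version B (the rewrite author's own statement) =====
-- stated objective: simpler
-- what changed: Replaces the two-pass build-a-digit-list-then-reconstruct algorithm by a single low-to-high pass that accumulates the result directly with a running place multiplier, eliminating the intermediate digit list.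
import Mathlib
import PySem

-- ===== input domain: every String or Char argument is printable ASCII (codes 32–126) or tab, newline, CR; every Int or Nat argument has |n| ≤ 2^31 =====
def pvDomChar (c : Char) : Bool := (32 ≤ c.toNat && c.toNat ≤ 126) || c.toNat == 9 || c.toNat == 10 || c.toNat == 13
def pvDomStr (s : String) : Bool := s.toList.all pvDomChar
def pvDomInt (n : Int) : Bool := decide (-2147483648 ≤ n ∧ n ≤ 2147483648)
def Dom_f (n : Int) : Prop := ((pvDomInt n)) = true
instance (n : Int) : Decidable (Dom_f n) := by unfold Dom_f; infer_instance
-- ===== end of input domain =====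

-- B replaces A's two passes (build the base-20 digit list, then fold it back high-to-low) by
-- one low-to-high pass accumulating the result with a running place multiplier, no list.
-- Both Pythons loop forever on n < 0 (n settles at -1); the 0 < n guards below only make the
-- ports total — on n ≤ 0 both ports return 0, so equivalence is proved without a Pre_.

-- ===== PORT A =====
-- while n: a.insert(0, n % 20); n //= 20
def fBuild (n : Int) (a : List Int) : List Int :=
  if 0 < n then fBuild (PySem.Int.floordiv n 20) (PySem.Int.mod n 20 :: a) else a
termination_by n.toNat
decreasing_by
  have h20 : PySem.Int.floordiv n 20 = n / 20 := PySem.Int.floordiv_eq_ediv_of_pos (by omega)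
  rw [h20]; omega

def f (n : Int) : Int :=
  let a := fBuild n []
  a.foldl (fun r d => r * 20 + (if d ≠ 19 then d + 1 else d)) 0

-- ===== PORT B =====
-- while n: d = n % 20; r += (d if d == 19 else d+1) * p; p *= 20; n //= 20
def fAltLoop (n r p : Int) : Int :=
  if 0 < n then
    let d := PySem.Int.mod n 20
    fAltLoop (PySem.Int.floordiv n 20) (r + (if d = 19 then d else d + 1) * p) (p * 20)
  else r
termination_by n.toNat
decreasing_by
  have h20 : PySem.Int.floordiv n 20 = n / 20 := PySem.Int.floordiv_eq_ediv_of_pos (by omega)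
  rw [h20]; omega

def f_alt (n : Int) : Int := fAltLoop n 0 1

-- ===== PRECONDITION & SPEC =====
def Spec_f (n : Int) (out : Int) : Prop := out = f_alt n
instance (n : Int) (out : Int) : Decidable (Spec_f n out) := by unfold Spec_f; infer_instance

-- ===== CLAIM (what is proved, stated in full; the proofs are below) =====
def Claim_equal_f : Prop := ∀ (n : Int), Dom_f n → Spec_f n (f n)

-- ===== LEMMAS AND PROOFS =====

theorem fBuild_append_aux (k : Nat) : ∀ (n : Int), n.toNat ≤ k → ∀ a, fBuild n a = fBuild n [] ++ a := by
  induction k with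
  | zero =>
    intro n hn a
    have h : ¬ 0 < n := by omega
    conv_lhs => rw [fBuild]
    conv_rhs => rw [fBuild]
    rw [if_neg h, if_neg h]; simp
  | succ k ih =>
    intro n hn a
    by_cases h : 0 < n
    · have h20 : PySem.Int.floordiv n 20 = n / 20 := PySem.Int.floordiv_eq_ediv_of_pos (by omega)
      have hlt : (PySem.Int.floordiv n 20).toNat ≤ k := by rw [h20]; omega
      conv_lhs => rw [fBuild]
      conv_rhs => rw [fBuild]
      rw [if_pos h, if_pos h]
      rw [ih _ hlt (PySem.Int.mod n 20 :: a), ih _ hlt [PySem.Int.mod n 20]]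
      simp
    · conv_lhs => rw [fBuild]
      conv_rhs => rw [fBuild]
      rw [if_neg h, if_neg h]; simp

theorem fBuild_append (n : Int) (a : List Int) : fBuild n a = fBuild n [] ++ a :=
  fBuild_append_aux n.toNat n le_rfl a

theorem f_nonpos (n : Int) (h : ¬ 0 < n) : f n = 0 := by
  unfold f
  rw [fBuild, if_neg h]
  rfl

-- one base-20 step of A: peel the least-significant digit
theorem f_step (n : Int) (h : 0 < n) :
    f n = 20 * f (PySem.Int.floordiv n 20)
          + (if PySem.Int.mod n 20 = 19 then PySem.Int.mod n 20 else PySem.Int.mod n 20 + 1) := by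
  conv_lhs => unfold f
  rw [fBuild, if_pos h, fBuild_append, List.foldl_append]
  rw [show (fBuild (PySem.Int.floordiv n 20) []).foldl
        (fun r d => r * 20 + (if d ≠ 19 then d + 1 else d)) 0 = f (PySem.Int.floordiv n 20) from rfl]
  simp only [List.foldl_cons, List.foldl_nil, ne_eq, ite_not]
  ring

theorem fAltLoop_inv (k : Nat) : ∀ (n : Int), n.toNat ≤ k → ∀ r p, fAltLoop n r p = r + p * f n := by
  induction k with
  | zero =>
    intro n hn r p
    have h : ¬ 0 < n := by omega
    rw [fAltLoop, if_neg h, f_nonpos n h]; ring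
  | succ k ih =>
    intro n hn r p
    by_cases h : 0 < n
    · have h20 : PySem.Int.floordiv n 20 = n / 20 := PySem.Int.floordiv_eq_ediv_of_pos (by omega)
      have hlt : (PySem.Int.floordiv n 20).toNat ≤ k := by rw [h20]; omega
      rw [fAltLoop, if_pos h, ih _ hlt, f_step n h]
      ring
    · rw [fAltLoop, if_neg h, f_nonpos n h]; ring

theorem f_eq_alt (n : Int) : f n = f_alt n := by
  unfold f_alt
  rw [fAltLoop_inv n.toNat n le_rfl 0 1]
  ring

-- ===== VERDICT (by name: the statement is the Claim_ definition above) =====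
theorem f_spec : Claim_equal_f := by
  intro n _
  exact f_eq_alt n
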